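-- pv_equiv track=rewrite | github.com/tenstorrent/tt-CableGen | export_descriptors.py | is_connection_within_scope
-- ===== SOURCE A (Python) =====
-- def is_connection_within_scope(source_hostname, target_hostname, child_ids, element_map):
--     """Check if both endpoints of a connection are within the given scope (child_ids)"""
--     # Find shelf nodes with these hostnames
--     source_found = False
--     target_found = False
--
--     for el in element_map.values():
--         data = el.get("data", {})
--         if data.get("type") == "shelf":
--             hostname = data.get("hostname")
--             if hostname == source_hostname:
--                 # Check if this shelf is a descendant of any child in child_ids
--                 if is_descendant_of_any(el, child_ids, element_map):
--                     source_found = True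
--             if hostname == target_hostname:
--                 if is_descendant_of_any(el, child_ids, element_map):
--                     target_found = True
--
--     return source_found and target_found
--
-- def is_descendant_of_any(node_el, ancestor_ids, element_map):
--     """Check if a node is a descendant of any node in ancestor_ids"""
--     current = node_el
--     while current:
--         parent_id = current.get("data", {}).get("parent")
--         if not parent_id:
--             break
--         if parent_id in ancestor_ids:
--             return True
--         current = element_map.get(parent_id)
--     return False
-- ===== SOURCE B (Python) =====
-- def is_connection_within_scope(source_hostname, target_hostname, child_ids, element_map):
--     """Check if both endpoints of a connection are within the given scope (child_ids)"""
--     # Compute the set of strict descendants of child_ids by a downward fixpoint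
--     # closure, then scan the shelves once.
--     in_scope = set()
--     changed = True
--     while changed:
--         changed = False
--         for eid, el in element_map.items():
--             p = el.get("data", {}).get("parent")
--             if p and eid not in in_scope and (p in child_ids or p in in_scope):
--                 in_scope.add(eid)
--                 changed = True
--     source_ok = False
--     target_ok = False
--     for eid, el in element_map.items():
--         data = el.get("data", {})
--         if data.get("type") == "shelf" and eid in in_scope:
--             if data.get("hostname") == source_hostname:
--                 source_ok = True
--             if data.get("hostname") == target_hostname:
--                 target_ok = True
--     return source_ok and target_ok
-- ===== Notes on version B (the rewrite author's own statement) =====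
-- stated objective: alternative
-- what changed: Replaces the per-shelf upward ancestor walks with a downward fixpoint closure: repeated passes over element_map build the set of strict descendants of child_ids, then one scan over the shelves checks both hostnames against that set.
import Mathlib
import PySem

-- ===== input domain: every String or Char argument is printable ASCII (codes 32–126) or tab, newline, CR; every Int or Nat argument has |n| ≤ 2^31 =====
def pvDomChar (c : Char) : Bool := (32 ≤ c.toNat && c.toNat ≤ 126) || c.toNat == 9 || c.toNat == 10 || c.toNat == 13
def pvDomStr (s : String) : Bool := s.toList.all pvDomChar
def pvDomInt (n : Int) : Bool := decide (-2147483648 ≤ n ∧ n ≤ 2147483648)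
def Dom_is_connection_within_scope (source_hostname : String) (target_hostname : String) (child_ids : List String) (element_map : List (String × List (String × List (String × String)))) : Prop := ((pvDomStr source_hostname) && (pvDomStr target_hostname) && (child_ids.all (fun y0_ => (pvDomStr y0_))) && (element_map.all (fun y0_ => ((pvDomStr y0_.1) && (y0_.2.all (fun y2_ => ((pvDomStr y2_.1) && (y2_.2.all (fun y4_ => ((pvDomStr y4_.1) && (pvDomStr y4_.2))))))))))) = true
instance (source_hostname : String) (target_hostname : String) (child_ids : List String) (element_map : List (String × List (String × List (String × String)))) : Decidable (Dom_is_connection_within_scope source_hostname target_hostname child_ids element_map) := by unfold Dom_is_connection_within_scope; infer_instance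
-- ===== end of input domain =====

-- B replaces A's per-shelf upward ancestor walks by a downward fixpoint closure
-- (the set of strict descendants of child_ids) followed by one scan over the shelves
-- (objective: alternative decomposition, same observable return value).


-- ===== PORT A =====
-- el.get("data", {}) seen as a dict (the inner Python dicts arrive as assoc lists)
def pvDataDictA (el : List (String × List (String × String))) : PySem.Dict String String :=
  PySem.Dict.ofList ((PySem.Dict.ofList el).getD "data" [])

-- is_descendant_of_any: the upward while-loop, made total by a fuel argument
-- (under Pre_ every truthy parent chain among keys is acyclic, hence shorter than the fuel)
def pvIsDescendantOfAny (child_ids : List String)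
    (em : PySem.Dict String (List (String × List (String × String)))) :
    Nat → Option (List (String × List (String × String))) → Bool
  | 0, _ => false
  | _ + 1, none => false
  | fuel + 1, some el =>
    match (pvDataDictA el).get? "parent" with
    | none => false
    | some p =>
      if p == "" then false
      else if child_ids.contains p then true
      else pvIsDescendantOfAny child_ids em fuel (em.get? p)

def is_connection_within_scope (source_hostname : String) (target_hostname : String) (child_ids : List String) (element_map : List (String × List (String × List (String × String)))) : Bool :=
  let em := PySem.Dict.ofList element_map
  let fuel := em.size + 1
  let r := em.values.foldl (fun (acc : Bool × Bool) el =>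
    let d := pvDataDictA el
    if d.get? "type" == some "shelf" then
      let hostname := d.get? "hostname"
      let acc1 := if hostname == some source_hostname then
          (if pvIsDescendantOfAny child_ids em fuel (some el) then (true, acc.2) else acc)
        else acc
      if hostname == some target_hostname then
        (if pvIsDescendantOfAny child_ids em fuel (some el) then (acc1.1, true) else acc1)
      else acc1
    else acc) (false, false)
  r.1 && r.2

-- ===== PORT B =====
def pvDataDictB (el : List (String × List (String × String))) : PySem.Dict String String :=
  PySem.Dict.ofList ((PySem.Dict.ofList el).getD "data" [])

-- one pass of the while-loop body: state = (in_scope, changed)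
def pvClosurePass (child_ids : List String)
    (items : List (String × List (String × List (String × String))))
    (st : PySem.Set String × Bool) : PySem.Set String × Bool :=
  items.foldl (fun st kv =>
    match (pvDataDictB kv.2).get? "parent" with
    | none => st
    | some p =>
      if !(p == "") && !(PySem.Set.contains st.1 kv.1)
          && (child_ids.contains p || PySem.Set.contains st.1 p) then
        (PySem.Set.add st.1 kv.1, true)
      else st) st

-- while changed: … (each changing pass strictly grows in_scope, so em.size + 1 passes suffice)
def pvClosureB (child_ids : List String)
    (items : List (String × List (String × List (String × String)))) :
    Nat → PySem.Set String → PySem.Set String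
  | 0, s => s
  | fuel + 1, s =>
    let r := pvClosurePass child_ids items (s, false)
    if r.2 then pvClosureB child_ids items fuel r.1 else r.1

def is_connection_within_scope_alt (source_hostname : String) (target_hostname : String) (child_ids : List String) (element_map : List (String × List (String × List (String × String)))) : Bool :=
  let em := PySem.Dict.ofList element_map
  let inScope := pvClosureB child_ids em.items (em.size + 1) PySem.Set.empty
  let r := em.items.foldl (fun (acc : Bool × Bool) kv =>
    let d := pvDataDictB kv.2
    if d.get? "type" == some "shelf" && PySem.Set.contains inScope kv.1 then
      let acc1 := if d.get? "hostname" == some source_hostname then (true, acc.2) else acc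
      if d.get? "hostname" == some target_hostname then (acc1.1, true) else acc1
    else acc) (false, false)
  r.1 && r.2

-- ===== PRECONDITION & SPEC =====
-- the "parent" field of an element, as both Pythons read it
def pvParentPre (el : List (String × List (String × String))) : Option String :=
  (PySem.Dict.ofList ((PySem.Dict.ofList el).getD "data" [])).get? "parent"

-- the truthy-parent successor among keys: k ↦ its parent p, when p is truthy and a key
def pvNextPre (em : PySem.Dict String (List (String × List (String × String))))
    (k : String) : Option String :=
  match em.get? k with
  | none => none
  | some el =>
    match pvParentPre el with
    | none => none
    | some p => if p = "" then none else (em.get? p).map (fun _ => p)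

-- k's position after m truthy-parent steps (none = the chain has left the key set)
def pvIterPre (em : PySem.Dict String (List (String × List (String × String)))) :
    Nat → String → Option String
  | 0, k => some k
  | m + 1, k =>
    match pvNextPre em k with
    | none => none
    | some p => pvIterPre em m p

-- Pre_ excludes exactly the element maps whose truthy parent links form a cycle among the
-- keys: on such maps Python A's upward while-loop can run forever.  (Equivalently: from
-- every key, following truthy parent links leaves the key set within |items| steps.)
def Pre_is_connection_within_scope (source_hostname : String) (target_hostname : String) (child_ids : List String) (element_map : List (String × List (String × List (String × String)))) : Prop :=
  ∀ kv ∈ (PySem.Dict.ofList element_map).items,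
    pvIterPre (PySem.Dict.ofList element_map)
      (PySem.Dict.ofList element_map).items.length kv.1 = none
instance (source_hostname : String) (target_hostname : String) (child_ids : List String) (element_map : List (String × List (String × List (String × String)))) : Decidable (Pre_is_connection_within_scope source_hostname target_hostname child_ids element_map) := by unfold Pre_is_connection_within_scope; infer_instance

def pvWitness_is_connection_within_scope : String × String × List String × (List (String × List (String × List (String × String)))) :=
  ("h", "h", ["r"],
    [("s", [("data", [("type", "shelf"), ("hostname", "h"), ("parent", "g")])]),
     ("g", [("data", [("parent", "r")])])])

def Spec_is_connection_within_scope (source_hostname : String) (target_hostname : String) (child_ids : List String) (element_map : List (String × List (String × List (String × String)))) (out : Bool) : Prop := out = is_connection_within_scope_alt source_hostname target_hostname child_ids element_map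
instance (source_hostname : String) (target_hostname : String) (child_ids : List String) (element_map : List (String × List (String × List (String × String)))) (out : Bool) : Decidable (Spec_is_connection_within_scope source_hostname target_hostname child_ids element_map out) := by unfold Spec_is_connection_within_scope; infer_instance

-- ===== CLAIM (what is proved, stated in full; the proofs are below) =====
def Claim_equal_is_connection_within_scope : Prop := ∀ (source_hostname : String) (target_hostname : String) (child_ids : List String) (element_map : List (String × List (String × List (String × String)))), Dom_is_connection_within_scope source_hostname target_hostname child_ids element_map → Pre_is_connection_within_scope source_hostname target_hostname child_ids element_map → Spec_is_connection_within_scope source_hostname target_hostname child_ids element_map (is_connection_within_scope source_hostname target_hostname child_ids element_map)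

-- ===== LEMMAS AND PROOFS =====

-- ---- abbreviations used only by the proofs ----
abbrev pvEl := List (String × List (String × String))

-- the downward-reachability specification both programs compute:
-- c is a strict descendant (via truthy parent links through the map) of some id in child_ids
inductive pvReach (child_ids : List String) (L : List (String × pvEl)) : String → Prop
  | base {c : String} {el : pvEl} {p : String} :
      (c, el) ∈ L → pvParentPre el = some p → p ≠ "" → p ∈ child_ids →
      pvReach child_ids L c
  | step {c : String} {el : pvEl} {p : String} :
      (c, el) ∈ L → pvParentPre el = some p → p ≠ "" → pvReach child_ids L p →
      pvReach child_ids L c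

theorem pvReach_mem {child_ids : List String} {L : List (String × pvEl)} {c : String}
    (h : pvReach child_ids L c) : ∃ el, (c, el) ∈ L := by
  cases h with
  | base hm _ _ _ => exact ⟨_, hm⟩
  | step hm _ _ _ => exact ⟨_, hm⟩

theorem pvUniq (em : PySem.Dict String pvEl) (hnd : em.keys.Nodup) {c : String} {el el' : pvEl}
    (h1 : (c, el) ∈ em.items) (h2 : (c, el') ∈ em.items) : el = el' := by
  have a := PySem.Dict.get?_of_mem_items em h1 hnd
  have b := PySem.Dict.get?_of_mem_items em h2 hnd
  rw [a] at b; exact Option.some.inj b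

theorem pvReach_inv (child_ids : List String) (em : PySem.Dict String pvEl)
    (hnd : em.keys.Nodup) {c : String} {el : pvEl} (hm : (c, el) ∈ em.items)
    (h : pvReach child_ids em.items c) :
    ∃ p, pvParentPre el = some p ∧ p ≠ "" ∧ (p ∈ child_ids ∨ pvReach child_ids em.items p) := by
  cases h with
  | base hm' hp hne hc => exact ⟨_, by rw [pvUniq em hnd hm hm']; exact hp, hne, Or.inl hc⟩
  | step hm' hp hne hr => exact ⟨_, by rw [pvUniq em hnd hm hm']; exact hp, hne, Or.inr hr⟩

theorem pvWalk_none (child_ids : List String) (em : PySem.Dict String pvEl) (f : Nat) :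
    pvIsDescendantOfAny child_ids em f none = false := by
  cases f <;> rfl

theorem pvWalk_succ_none (child_ids : List String) (em : PySem.Dict String pvEl)
    (f : Nat) (el : pvEl) (h : pvParentPre el = none) :
    pvIsDescendantOfAny child_ids em (f + 1) (some el) = false := by
  unfold pvIsDescendantOfAny
  rw [show (pvDataDictA el).get? "parent" = pvParentPre el from rfl, h]

theorem pvWalk_succ_some (child_ids : List String) (em : PySem.Dict String pvEl)
    (f : Nat) (el : pvEl) (p : String) (h : pvParentPre el = some p) :
    pvIsDescendantOfAny child_ids em (f + 1) (some el) =
      if p == "" then false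
      else if child_ids.contains p then true
      else pvIsDescendantOfAny child_ids em f (em.get? p) := by
  conv_lhs => unfold pvIsDescendantOfAny
  rw [show (pvDataDictA el).get? "parent" = pvParentPre el from rfl, h]

-- ---- A-side: the upward walk decides pvReach (under Pre_'s acyclicity) ----
theorem pvWalk_iff (child_ids : List String) (em : PySem.Dict String pvEl)
    (hnd : em.keys.Nodup) :
    ∀ m f k el, (k, el) ∈ em.items → pvIterPre em m k = none → m ≤ f →
      (pvIsDescendantOfAny child_ids em f (some el) = true ↔
        pvReach child_ids em.items k) := by
  intro m
  induction m with
  | zero => intro f k el _ hiter _; simp [pvIterPre] at hiter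
  | succ m ih =>
    intro f k el hmem hiter hf
    have hget : em.get? k = some el := PySem.Dict.get?_of_mem_items em hmem hnd
    cases f with
    | zero => omega
    | succ f =>
      cases hp : pvParentPre el with
      | none =>
        rw [pvWalk_succ_none child_ids em f el hp]
        simp only [Bool.false_eq_true, false_iff]
        intro hr
        obtain ⟨p, hp', _, _⟩ := pvReach_inv child_ids em hnd hmem hr
        rw [hp] at hp'; simp at hp'
      | some p =>
        rw [pvWalk_succ_some child_ids em f el p hp]
        by_cases hpe : p = ""
        · subst hpe
          simp only [BEq.rfl, if_true, Bool.false_eq_true, false_iff]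
          intro hr
          obtain ⟨p', hp', hne, _⟩ := pvReach_inv child_ids em hnd hmem hr
          rw [hp] at hp'; exact hne (Option.some.inj hp').symm
        · rw [if_neg (by simpa using hpe)]
          by_cases hcm : p ∈ child_ids
          · rw [if_pos (List.contains_iff_mem.mpr hcm)]
            simp only [true_iff]
            exact pvReach.base hmem hp hpe hcm
          · rw [if_neg (by simpa using hcm)]
            cases hq : em.get? p with
            | none =>
              rw [pvWalk_none]
              simp only [Bool.false_eq_true, false_iff]
              intro hr
              obtain ⟨p', hp', hne, hor⟩ := pvReach_inv child_ids em hnd hmem hr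
              rw [hp] at hp'
              obtain rfl : p = p' := Option.some.inj hp'
              rcases hor with h | h
              · exact hcm h
              · obtain ⟨el'', hm''⟩ := pvReach_mem h
                rw [PySem.Dict.get?_of_mem_items em hm'' hnd] at hq
                simp at hq
            | some el' =>
              have hm' : (p, el') ∈ em.items := PySem.Dict.mem_items_of_get?_eq_some em hq
              have hnext : pvNextPre em k = some p := by
                simp [pvNextPre, hget, hp, hpe, hq]
              have hiter' : pvIterPre em m p = none := by
                have : pvIterPre em (m + 1) k =
                    match pvNextPre em k with
                    | none => none
                    | some p' => pvIterPre em m p' := rfl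
                rw [this, hnext] at hiter
                exact hiter
              rw [ih f p el' hm' hiter' (by omega)]
              constructor
              · intro hr
                exact pvReach.step hmem hp hpe hr
              · intro hr
                obtain ⟨p', hp', hne, hor⟩ := pvReach_inv child_ids em hnd hmem hr
                rw [hp] at hp'
                obtain rfl : p = p' := Option.some.inj hp'
                rcases hor with h | h
                · exact absurd h hcm
                · exact h

-- ---- B-side: one closure pass ----
-- the loop body of a pass (pvClosurePass is its foldl; pvPass_cons/pvPass_nil are rfl)
def pvStep (child_ids : List String) (st : PySem.Set String × Bool) (kv : String × pvEl) :
    PySem.Set String × Bool :=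
  match (pvDataDictB kv.2).get? "parent" with
  | none => st
  | some p =>
    if !(p == "") && !(PySem.Set.contains st.1 kv.1)
        && (child_ids.contains p || PySem.Set.contains st.1 p) then
      (PySem.Set.add st.1 kv.1, true)
    else st

theorem pvPass_nil (child_ids : List String) (st : PySem.Set String × Bool) :
    pvClosurePass child_ids [] st = st := rfl

theorem pvPass_cons (child_ids : List String) (kv : String × pvEl) (M : List (String × pvEl))
    (st : PySem.Set String × Bool) :
    pvClosurePass child_ids (kv :: M) st = pvClosurePass child_ids M (pvStep child_ids st kv) := rfl

theorem pvStep_none (child_ids : List String) (st : PySem.Set String × Bool) (kv : String × pvEl)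
    (h : pvParentPre kv.2 = none) : pvStep child_ids st kv = st := by
  unfold pvStep
  rw [show (pvDataDictB kv.2).get? "parent" = pvParentPre kv.2 from rfl, h]

theorem pvStep_some (child_ids : List String) (st : PySem.Set String × Bool) (kv : String × pvEl)
    (p : String) (h : pvParentPre kv.2 = some p) :
    pvStep child_ids st kv =
      if !(p == "") && !(PySem.Set.contains st.1 kv.1)
          && (child_ids.contains p || PySem.Set.contains st.1 p) then
        (PySem.Set.add st.1 kv.1, true)
      else st := by
  conv_lhs => unfold pvStep
  rw [show (pvDataDictB kv.2).get? "parent" = pvParentPre kv.2 from rfl, h]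

theorem pvStep_spec (child_ids : List String) (st : PySem.Set String × Bool) (kv : String × pvEl) :
    (pvStep child_ids st kv = st ∧
      (∀ p, pvParentPre kv.2 = some p → p ≠ "" → (p ∈ child_ids ∨ p ∈ st.1) → kv.1 ∈ st.1)) ∨
    (kv.1 ∉ st.1 ∧ pvStep child_ids st kv = (st.1.add kv.1, true)) := by
  cases hp : pvParentPre kv.2 with
  | none =>
    refine Or.inl ⟨pvStep_none child_ids st kv hp, ?_⟩
    intro p h
    simp at h
  | some p =>
    rw [pvStep_some child_ids st kv p hp]
    by_cases hcond : (!(p == "") && !(PySem.Set.contains st.1 kv.1)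
        && (child_ids.contains p || PySem.Set.contains st.1 p)) = true
    · rw [if_pos hcond]
      refine Or.inr ⟨?_, rfl⟩
      simp only [Bool.and_eq_true, Bool.not_eq_true'] at hcond
      intro hmem
      rw [(PySem.Set.contains_iff st.1 kv.1).mpr hmem] at hcond
      simp at hcond
    · rw [if_neg hcond]
      refine Or.inl ⟨rfl, ?_⟩
      intro p' hp' hne hor
      obtain rfl : p = p' := Option.some.inj hp'
      simp only [Bool.and_eq_true, Bool.not_eq_true', Bool.or_eq_true, not_and, not_or] at hcond
      by_contra hnm
      have hpair := hcond ⟨by simpa using hne, by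
        have hcc : ¬ PySem.Set.contains st.1 kv.1 = true :=
          fun hc => hnm ((PySem.Set.contains_iff st.1 kv.1).mp hc)
        simpa using hcc⟩
      rcases hor with h | h
      · exact hpair.1 (List.contains_iff_mem.mpr h)
      · exact hpair.2 ((PySem.Set.contains_iff st.1 p).mpr h)

theorem pvPass_flag_mono (child_ids : List String) (M : List (String × pvEl)) :
    ∀ st : PySem.Set String × Bool, st.2 = true → (pvClosurePass child_ids M st).2 = true := by
  induction M with
  | nil => intro st h; rw [pvPass_nil]; exact h
  | cons kv M ihM =>
    intro st h
    rw [pvPass_cons]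
    rcases pvStep_spec child_ids st kv with ⟨heq, _⟩ | ⟨_, heq⟩
    · rw [heq]; exact ihM st h
    · rw [heq]; exact ihM _ rfl

theorem pvPass_set_mono (child_ids : List String) (M : List (String × pvEl)) :
    ∀ st : PySem.Set String × Bool, ∀ x ∈ st.1, x ∈ (pvClosurePass child_ids M st).1 := by
  induction M with
  | nil => intro st x h; rw [pvPass_nil]; exact h
  | cons kv M ihM =>
    intro st x h
    rw [pvPass_cons]
    rcases pvStep_spec child_ids st kv with ⟨heq, _⟩ | ⟨_, heq⟩
    · rw [heq]; exact ihM st x h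
    · rw [heq]; exact ihM _ x ((PySem.Set.mem_add st.1 kv.1 x).mpr (Or.inl h))

theorem pvPass_nochange (child_ids : List String) (M : List (String × pvEl)) :
    ∀ s : PySem.Set String, (pvClosurePass child_ids M (s, false)).2 = false →
      (pvClosurePass child_ids M (s, false)).1 = s ∧
      ∀ kv ∈ M, ∀ p, pvParentPre kv.2 = some p → p ≠ "" → (p ∈ child_ids ∨ p ∈ s) →
        kv.1 ∈ s := by
  induction M with
  | nil => intro s _; exact ⟨rfl, by intro kv h; simp at h⟩
  | cons kv M ihM =>
    intro s hfl
    rw [pvPass_cons] at hfl ⊢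
    rcases pvStep_spec child_ids (s, false) kv with ⟨heq, hcl⟩ | ⟨_, heq⟩
    · rw [heq] at hfl ⊢
      obtain ⟨h1, h2⟩ := ihM s hfl
      refine ⟨h1, ?_⟩
      intro kv' hkv' p hp hne hor
      rcases List.mem_cons.mp hkv' with rfl | h
      · exact hcl p hp hne hor
      · exact h2 kv' h p hp hne hor
    · rw [heq] at hfl
      rw [pvPass_flag_mono child_ids M _ rfl] at hfl
      exact absurd hfl (by simp)

theorem pvPass_progress (child_ids : List String) (M : List (String × pvEl)) :
    ∀ st : PySem.Set String × Bool, (pvClosurePass child_ids M st).2 = true →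
      st.2 = true ∨ ∃ kv ∈ M, kv.1 ∈ (pvClosurePass child_ids M st).1 ∧ kv.1 ∉ st.1 := by
  induction M with
  | nil => intro st h; rw [pvPass_nil] at h; exact Or.inl h
  | cons kv M ihM =>
    intro st h
    rw [pvPass_cons] at h ⊢
    rcases pvStep_spec child_ids st kv with ⟨heq, _⟩ | ⟨hnm, heq⟩
    · rw [heq] at h ⊢
      rcases ihM st h with h' | ⟨kv', hm', hx⟩
      · exact Or.inl h'
      · exact Or.inr ⟨kv', List.mem_cons_of_mem _ hm', hx⟩
    · rw [heq]
      refine Or.inr ⟨kv, List.mem_cons_self .., ?_, hnm⟩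
      exact pvPass_set_mono child_ids M _ kv.1 ((PySem.Set.mem_add st.1 kv.1 kv.1).mpr (Or.inr rfl))

theorem pvPass_sound (child_ids : List String) (L : List (String × pvEl))
    (M : List (String × pvEl)) (hM : ∀ kv ∈ M, kv ∈ L) :
    ∀ st : PySem.Set String × Bool, (∀ x ∈ st.1, pvReach child_ids L x) →
      ∀ x ∈ (pvClosurePass child_ids M st).1, pvReach child_ids L x := by
  induction M with
  | nil => intro st hs x hx; rw [pvPass_nil] at hx; exact hs x hx
  | cons kv M ihM =>
    intro st hs x hx
    rw [pvPass_cons] at hx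
    have hM' : ∀ kv' ∈ M, kv' ∈ L := fun kv' h => hM kv' (List.mem_cons_of_mem _ h)
    rcases pvStep_spec child_ids st kv with ⟨heq, _⟩ | ⟨hnm, heq⟩
    · rw [heq] at hx; exact ihM hM' st hs x hx
    · rw [heq] at hx
      refine ihM hM' _ ?_ x hx
      intro y hy
      rcases (PySem.Set.mem_add st.1 kv.1 y).mp hy with h | rfl
      · exact hs y h
      · -- kv.1 was just added: its parent is truthy and already justified
        have hkv : kv ∈ L := hM kv (List.mem_cons_self ..)
        have hkv' : (kv.1, kv.2) ∈ L := by simpa using hkv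
        cases hp : pvParentPre kv.2 with
        | none =>
          rw [pvStep_none child_ids st kv hp] at heq
          have hx : st.1 = st.1.add kv.1 := congrArg Prod.fst heq
          rw [hx] at hnm
          exact absurd ((PySem.Set.mem_add st.1 kv.1 kv.1).mpr (Or.inr rfl)) hnm
        | some p =>
          rw [pvStep_some child_ids st kv p hp] at heq
          by_cases hcond : (!(p == "") && !(PySem.Set.contains st.1 kv.1)
              && (child_ids.contains p || PySem.Set.contains st.1 p)) = true
          · simp only [Bool.and_eq_true, Bool.not_eq_true', Bool.or_eq_true] at hcond
            obtain ⟨⟨hpne, _⟩, hor⟩ := hcond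
            have hne : p ≠ "" := by simpa using hpne
            rcases hor with h | h
            · exact pvReach.base hkv' hp hne (List.contains_iff_mem.mp h)
            · exact pvReach.step hkv' hp hne (hs p ((PySem.Set.contains_iff st.1 p).mp h))
          · rw [if_neg hcond] at heq
            have hx : st.1 = st.1.add kv.1 := congrArg Prod.fst heq
            rw [hx] at hnm
            exact absurd ((PySem.Set.mem_add st.1 kv.1 kv.1).mpr (Or.inr rfl)) hnm

-- ---- B-side: the fixpoint loop ----
def pvMiss (L : List (String × pvEl)) (s : PySem.Set String) : Nat :=
  ((L.map (·.1)).filter (fun k => !(PySem.Set.contains s k))).length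

theorem pvMiss_lt (L : List (String × pvEl)) (s t : PySem.Set String)
    (hsub : ∀ x ∈ s, x ∈ t) {x : String} (hxK : x ∈ L.map (·.1)) (hxt : x ∈ t) (hxs : x ∉ s) :
    pvMiss L t < pvMiss L s := by
  obtain ⟨K1, K2, hK⟩ := List.append_of_mem hxK
  unfold pvMiss
  rw [hK]
  simp only [List.filter_append, List.length_append, List.filter_cons]
  have hxt' : (!(PySem.Set.contains t x)) = false := by
    simp [(PySem.Set.contains_iff t x).mpr hxt, hxt]
  have hxs' : (!(PySem.Set.contains s x)) = true := by
    simp only [Bool.not_eq_true']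
    rw [← Bool.not_eq_true]
    intro hc
    exact hxs ((PySem.Set.contains_iff s x).mp hc)
  rw [hxt', hxs']
  simp only [if_false, if_true, List.length_cons, Bool.false_eq_true]
  have hmono : ∀ K : List String,
      (K.filter (fun k => !(PySem.Set.contains t k))).length ≤
      (K.filter (fun k => !(PySem.Set.contains s k))).length := by
    intro K
    rw [← List.countP_eq_length_filter, ← List.countP_eq_length_filter]
    refine List.countP_mono_left ?_
    intro k _ hk
    simp only [Bool.not_eq_true'] at hk ⊢
    rw [← Bool.not_eq_true] at hk ⊢
    intro hc
    exact hk ((PySem.Set.contains_iff t k).mpr (hsub k ((PySem.Set.contains_iff s k).mp hc)))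
  have := hmono K1
  have := hmono K2
  omega

theorem pvClosureB_succ (child_ids : List String) (L : List (String × pvEl))
    (f : Nat) (s : PySem.Set String) :
    pvClosureB child_ids L (f + 1) s =
      if (pvClosurePass child_ids L (s, false)).2 then
        pvClosureB child_ids L f (pvClosurePass child_ids L (s, false)).1
      else (pvClosurePass child_ids L (s, false)).1 := rfl

theorem pvClosureB_sound (child_ids : List String) (L : List (String × pvEl)) :
    ∀ f s, (∀ x ∈ s, pvReach child_ids L x) →
      ∀ x ∈ pvClosureB child_ids L f s, pvReach child_ids L x := by
  intro f
  induction f with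
  | zero => intro s hs x hx; exact hs x hx
  | succ f ih =>
    intro s hs x hx
    rw [pvClosureB_succ] at hx
    have hsound := pvPass_sound child_ids L L (fun kv h => h) (s, false) hs
    by_cases hfl : (pvClosurePass child_ids L (s, false)).2 = true
    · rw [if_pos hfl] at hx
      exact ih _ hsound x hx
    · rw [if_neg hfl] at hx
      exact hsound x hx

theorem pvClosureB_closed (child_ids : List String) (L : List (String × pvEl)) :
    ∀ f s, pvMiss L s < f →
      ∀ kv ∈ L, ∀ p, pvParentPre kv.2 = some p → p ≠ "" →
        (p ∈ child_ids ∨ p ∈ pvClosureB child_ids L f s) → kv.1 ∈ pvClosureB child_ids L f s := by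
  intro f
  induction f with
  | zero => intro s h; omega
  | succ f ih =>
    intro s hms
    by_cases hfl : (pvClosurePass child_ids L (s, false)).2 = true
    · have hres : pvClosureB child_ids L (f + 1) s
          = pvClosureB child_ids L f (pvClosurePass child_ids L (s, false)).1 := by
        rw [pvClosureB_succ, if_pos hfl]
      rw [hres]
      rcases pvPass_progress child_ids L (s, false) hfl with h | ⟨kv, hkv, hin, hout⟩
      · simp at h
      · have hsub : ∀ x ∈ s, x ∈ (pvClosurePass child_ids L (s, false)).1 :=
          fun x h => pvPass_set_mono child_ids L (s, false) x h
        have hlt := pvMiss_lt L s (pvClosurePass child_ids L (s, false)).1 hsub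
          (List.mem_map.mpr ⟨kv, hkv, rfl⟩) hin hout
        exact ih _ (by omega)
    · have hres : pvClosureB child_ids L (f + 1) s = (pvClosurePass child_ids L (s, false)).1 := by
        rw [pvClosureB_succ, if_neg hfl]
      have hfl' : (pvClosurePass child_ids L (s, false)).2 = false := by
        simpa using hfl
      obtain ⟨h1, h2⟩ := pvPass_nochange child_ids L s hfl'
      rw [hres, h1]
      exact h2

theorem pvReach_mem_closed (child_ids : List String) (L : List (String × pvEl))
    (S : PySem.Set String)
    (hcl : ∀ kv ∈ L, ∀ p, pvParentPre kv.2 = some p → p ≠ "" → (p ∈ child_ids ∨ p ∈ S) → kv.1 ∈ S) :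
    ∀ c, pvReach child_ids L c → c ∈ S := by
  intro c h
  induction h with
  | base hm hp hne hc => exact hcl _ hm _ hp hne (Or.inl hc)
  | step hm hp hne _ ihr => exact hcl _ hm _ hp hne (Or.inr ihr)

theorem pvClosure_mem_iff (child_ids : List String) (em : PySem.Dict String pvEl) :
    ∀ c, c ∈ pvClosureB child_ids em.items (em.size + 1) PySem.Set.empty ↔
      pvReach child_ids em.items c := by
  intro c
  constructor
  · intro h
    exact pvClosureB_sound child_ids em.items (em.size + 1) PySem.Set.empty
      (by intro x hx; simp [PySem.Set.empty] at hx) c h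
  · intro h
    refine pvReach_mem_closed child_ids em.items _ ?_ c h
    refine pvClosureB_closed child_ids em.items (em.size + 1) PySem.Set.empty ?_
    have h1 : pvMiss em.items PySem.Set.empty ≤ em.items.length := by
      unfold pvMiss
      calc ((em.items.map (·.1)).filter _).length ≤ (em.items.map (·.1)).length :=
            List.length_filter_le _ _
        _ = em.items.length := List.length_map ..
    have h2 : em.size = em.items.length := rfl
    omega

-- ---- assembly ----
-- the two fold bodies, named so the final rewriting stays readable (defeq to the ports' lambdas)
def pvStepA (source_hostname target_hostname : String) (child_ids : List String)
    (em : PySem.Dict String pvEl) (fuel : Nat) (acc : Bool × Bool) (el : pvEl) : Bool × Bool :=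
  let d := pvDataDictA el
  if d.get? "type" == some "shelf" then
    let hostname := d.get? "hostname"
    let acc1 := if hostname == some source_hostname then
        (if pvIsDescendantOfAny child_ids em fuel (some el) then (true, acc.2) else acc)
      else acc
    if hostname == some target_hostname then
      (if pvIsDescendantOfAny child_ids em fuel (some el) then (acc1.1, true) else acc1)
    else acc1
  else acc

def pvStepB (source_hostname target_hostname : String) (S : PySem.Set String)
    (acc : Bool × Bool) (kv : String × pvEl) : Bool × Bool :=
  let d := pvDataDictB kv.2
  if d.get? "type" == some "shelf" && PySem.Set.contains S kv.1 then
    let acc1 := if d.get? "hostname" == some source_hostname then (true, acc.2) else acc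
    if d.get? "hostname" == some target_hostname then (acc1.1, true) else acc1
  else acc

theorem pvStepAB (source_hostname target_hostname : String) (child_ids : List String)
    (em : PySem.Dict String pvEl) (fuel : Nat) (S : PySem.Set String) (kv : String × pvEl)
    (hk : pvIsDescendantOfAny child_ids em fuel (some kv.2) = PySem.Set.contains S kv.1)
    (acc : Bool × Bool) :
    pvStepA source_hostname target_hostname child_ids em fuel acc kv.2
      = pvStepB source_hostname target_hostname S acc kv := by
  unfold pvStepA pvStepB
  rw [show pvDataDictB = pvDataDictA from rfl]
  rw [hk]
  cases hb : PySem.Set.contains S kv.1 with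
  | false => simp
  | true => simp

-- ===== VERDICT (by name: the statement is the Claim_ definition above) =====
theorem is_connection_within_scope_spec : Claim_equal_is_connection_within_scope := by
  intro source_hostname target_hostname child_ids element_map _hDom hPre
  unfold Spec_is_connection_within_scope
  have hnd := PySem.Dict.nodup_keys_ofList element_map
  have hkey : ∀ kv ∈ (PySem.Dict.ofList element_map).items,
      pvIsDescendantOfAny child_ids (PySem.Dict.ofList element_map)
        ((PySem.Dict.ofList element_map).size + 1) (some kv.2)
      = PySem.Set.contains
          (pvClosureB child_ids (PySem.Dict.ofList element_map).items
            ((PySem.Dict.ofList element_map).size + 1) PySem.Set.empty) kv.1 := by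
    intro kv hkv
    apply Bool.coe_iff_coe.mp
    have hsz : (PySem.Dict.ofList element_map).size
        = (PySem.Dict.ofList element_map).items.length := rfl
    have hw := pvWalk_iff child_ids (PySem.Dict.ofList element_map) hnd
      (PySem.Dict.ofList element_map).items.length
      ((PySem.Dict.ofList element_map).size + 1) kv.1 kv.2
      (by simpa using hkv) (hPre kv hkv) (by omega)
    rw [hw, PySem.Set.contains_iff]
    exact (pvClosure_mem_iff child_ids (PySem.Dict.ofList element_map) kv.1).symm
  have hA : is_connection_within_scope source_hostname target_hostname child_ids element_map
      = (((PySem.Dict.ofList element_map).values.foldl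
          (pvStepA source_hostname target_hostname child_ids (PySem.Dict.ofList element_map)
            ((PySem.Dict.ofList element_map).size + 1)) (false, false)).1 &&
         ((PySem.Dict.ofList element_map).values.foldl
          (pvStepA source_hostname target_hostname child_ids (PySem.Dict.ofList element_map)
            ((PySem.Dict.ofList element_map).size + 1)) (false, false)).2) := rfl
  have hB : is_connection_within_scope_alt source_hostname target_hostname child_ids element_map
      = (((PySem.Dict.ofList element_map).items.foldl
          (pvStepB source_hostname target_hostname
            (pvClosureB child_ids (PySem.Dict.ofList element_map).items
              ((PySem.Dict.ofList element_map).size + 1) PySem.Set.empty)) (false, false)).1 &&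
         ((PySem.Dict.ofList element_map).items.foldl
          (pvStepB source_hostname target_hostname
            (pvClosureB child_ids (PySem.Dict.ofList element_map).items
              ((PySem.Dict.ofList element_map).size + 1) PySem.Set.empty)) (false, false)).2) := rfl
  rw [hA, hB]
  rw [show (PySem.Dict.ofList element_map).values
      = (PySem.Dict.ofList element_map).items.map (·.2) from rfl, List.foldl_map]
  rw [PySem.List.foldl_congr_mem _ _ _ _ (fun acc kv hkv =>
    pvStepAB source_hostname target_hostname child_ids (PySem.Dict.ofList element_map)
      ((PySem.Dict.ofList element_map).size + 1)
      (pvClosureB child_ids (PySem.Dict.ofList element_map).items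
        ((PySem.Dict.ofList element_map).size + 1) PySem.Set.empty) kv (hkey kv hkv) acc)]
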